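-- pv_equiv track=rewrite | github.com/TomWis97/urenlog | overview.py | buildOverviewList
-- ===== SOURCE A (Python) =====
-- def buildOverviewList(data, codes, max_length):
--     """Convert from list per day to list per code.
--     Expects paramters from loadData() and getCodesForMonth()"""
--     overview_data = []
--     for code in codes:
--         if len(overview_data) == max_length:
--             # Don't display values without label.
--             break
--         current_code = []
--         for day_number in sorted(data.keys()):
--             day = data[day_number]
--             day_code_combo = ""
--             for day_entry in day:
--                 if day_entry[1] == code[0]:
--                     day_code_combo = day_entry[0]
--             if day_code_combo == "":
--                 day_code_combo = "-"
--             current_code.append(day_code_combo)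
--         overview_data.append(current_code)
--     if len(overview_data) == 0:
--         # No data. Display dashes.
--         filler_row = []
--         for day in data.keys():
--             filler_row.append('-')
--         overview_data.append(filler_row)
--     return overview_data
-- ===== SOURCE B (Python) =====
-- def buildOverviewList(data, codes, max_length):
--     days = sorted(data.keys())
--     day_maps = [{entry[1]: entry[0] for entry in data[d]} for d in days]
--     selected = list(codes) if max_length < 0 else codes[:max_length]
--     overview_data = [[m.get(code[0]) or '-' for m in day_maps] for code in selected]
--     if not overview_data:
--         overview_data = [['-'] * len(days)]
--     return overview_data
-- ===== Notes on version B (the rewrite author's own statement) =====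
-- stated objective: faster
-- what changed: Instead of rescanning every day's full entry list for every code (last match wins), B builds one code->value dict per day in a single pass and fills each row by O(1) lookups; the code selection becomes a slice (codes[:max_length], or all codes when max_length is negative) and the filler row a replicate.
import Mathlib
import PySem

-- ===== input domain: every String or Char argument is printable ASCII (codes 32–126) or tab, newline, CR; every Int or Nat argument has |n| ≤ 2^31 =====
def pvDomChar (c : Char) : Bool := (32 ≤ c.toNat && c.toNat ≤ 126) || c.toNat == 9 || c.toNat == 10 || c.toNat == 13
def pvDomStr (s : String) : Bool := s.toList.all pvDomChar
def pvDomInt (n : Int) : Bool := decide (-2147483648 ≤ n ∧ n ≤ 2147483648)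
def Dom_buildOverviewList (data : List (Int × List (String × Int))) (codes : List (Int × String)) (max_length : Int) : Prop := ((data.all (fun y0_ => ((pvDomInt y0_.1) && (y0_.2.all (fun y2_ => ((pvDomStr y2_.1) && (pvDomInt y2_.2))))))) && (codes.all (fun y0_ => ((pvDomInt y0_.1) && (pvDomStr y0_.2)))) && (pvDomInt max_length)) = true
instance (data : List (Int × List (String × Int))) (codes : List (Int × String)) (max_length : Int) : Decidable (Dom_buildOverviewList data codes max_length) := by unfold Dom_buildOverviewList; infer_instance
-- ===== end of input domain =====

-- B replaces A's per-code rescans of every day's entries by one code→value dict built once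
-- per day, then fills the rows by lookup (objective: faster, an inner scan disappears).

-- ===== PORT A =====
-- the innermost loop: last matching entry wins, "" becomes "-"
def pvCellA (day : List (String × Int)) (k : Int) : String :=
  let combo := day.foldl (fun s e => if e.2 == k then e.1 else s) ""
  if combo = "" then "-" else combo

-- the middle loop: append one cell per sorted day
def pvRowA (d : PySem.Dict Int (List (String × Int))) (days : List Int) (k : Int) : List String :=
  days.foldl (fun r day => r ++ [pvCellA (d.getD day []) k]) []

-- the outer loop with its break on len(overview_data) == max_length
def pvLoopA (d : PySem.Dict Int (List (String × Int))) (days : List Int) (max_length : Int) :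
    List (Int × String) → List (List String) → List (List String)
  | [], acc => acc
  | c :: rest, acc =>
    if (acc.length : Int) = max_length then acc
    else pvLoopA d days max_length rest (acc ++ [pvRowA d days c.1])

def buildOverviewList (data : List (Int × List (String × Int))) (codes : List (Int × String)) (max_length : Int) : List (List String) :=
  let d := PySem.Dict.ofList data
  let days := PySem.List.sorted d.keys (fun x => x) false
  let ov := pvLoopA d days max_length codes []
  if ov.length = 0 then ov ++ [d.keys.foldl (fun r _ => r ++ ["-"]) []] else ov

-- ===== PORT B =====
-- {entry[1]: entry[0] for entry in day}
def pvDayMap (day : List (String × Int)) : PySem.Dict Int String :=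
  day.foldl (fun m e => m.insert e.2 e.1) PySem.Dict.empty

-- m.get(k) or '-'
def pvCellB (m : PySem.Dict Int String) (k : Int) : String :=
  match m.get? k with
  | some v => if v = "" then "-" else v
  | none => "-"

def buildOverviewList_alt (data : List (Int × List (String × Int))) (codes : List (Int × String)) (max_length : Int) : List (List String) :=
  let d := PySem.Dict.ofList data
  let days := PySem.List.sorted d.keys (fun x => x) false
  let dayMaps := days.map (fun day => pvDayMap (d.getD day []))
  let selected := if max_length < 0 then codes else codes.take max_length.toNat
  let ov := selected.map (fun c => dayMaps.map (fun m => pvCellB m c.1))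
  if ov = [] then [List.replicate days.length "-"] else ov

-- ===== PRECONDITION & SPEC =====
def Spec_buildOverviewList (data : List (Int × List (String × Int))) (codes : List (Int × String)) (max_length : Int) (out : List (List String)) : Prop := out = buildOverviewList_alt data codes max_length
instance (data : List (Int × List (String × Int))) (codes : List (Int × String)) (max_length : Int) (out : List (List String)) : Decidable (Spec_buildOverviewList data codes max_length out) := by unfold Spec_buildOverviewList; infer_instance

-- ===== CLAIM (what is proved, stated in full; the proofs are below) =====
def Claim_equal_buildOverviewList : Prop := ∀ (data : List (Int × List (String × Int))) (codes : List (Int × String)) (max_length : Int), Dom_buildOverviewList data codes max_length → Spec_buildOverviewList data codes max_length (buildOverviewList data codes max_length)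

-- ===== LEMMAS AND PROOFS =====

-- the generic append-loop is a map
theorem pv_foldl_append_map {α β : Type} (f : α → β) (xs : List α) (acc : List β) :
    xs.foldl (fun r x => r ++ [f x]) acc = acc ++ xs.map f := by
  induction xs generalizing acc with
  | nil => simp
  | cons x xs ih => simp [List.foldl, ih]

-- lookup in the fold-built dict is A's last-match fold (with "" standing for "missing")
theorem pv_dayMap_get (day : List (String × Int)) (m : PySem.Dict Int String) (k : Int) :
    ((day.foldl (fun m e => m.insert e.2 e.1) m).get? k).getD "" =
      day.foldl (fun s e => if e.2 == k then e.1 else s) ((m.get? k).getD "") := by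
  induction day generalizing m with
  | nil => rfl
  | cons e rest ih =>
    simp only [List.foldl]
    rw [ih]
    congr 1
    rw [PySem.Dict.get?_insert]
    by_cases h : e.2 = k
    · simp [h]
    · simp [h, Ne.symm h]

theorem pv_cell_eq (day : List (String × Int)) (k : Int) :
    pvCellB (pvDayMap day) k = pvCellA day k := by
  have hB : pvCellB (pvDayMap day) k =
      (if ((pvDayMap day).get? k).getD "" = "" then "-" else ((pvDayMap day).get? k).getD "") := by
    unfold pvCellB
    cases h : (pvDayMap day).get? k <;> simp [h]
  rw [hB]
  unfold pvDayMap at *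
  rw [pv_dayMap_get day PySem.Dict.empty k]
  simp [PySem.Dict.get?_empty, pvCellA]

theorem pv_row_eq (d : PySem.Dict Int (List (String × Int))) (days : List Int) (k : Int) :
    pvRowA d days k = (days.map (fun day => pvDayMap (d.getD day []))).map (fun m => pvCellB m k) := by
  unfold pvRowA
  rw [pv_foldl_append_map]
  simp [List.map_map, Function.comp, pv_cell_eq]

-- A's break loop, negative bound: never fires
theorem pv_loopA_neg (d : PySem.Dict Int (List (String × Int))) (days : List Int) (ml : Int)
    (hml : ml < 0) (codes : List (Int × String)) (acc : List (List String)) :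
    pvLoopA d days ml codes acc = acc ++ codes.map (fun c => pvRowA d days c.1) := by
  induction codes generalizing acc with
  | nil => simp [pvLoopA]
  | cons c rest ih =>
    rw [pvLoopA]
    have : ¬ ((acc.length : Int) = ml) := by omega
    rw [if_neg this, ih]
    simp

-- A's break loop, nonnegative bound: takes the remaining budget
theorem pv_loopA_nonneg (d : PySem.Dict Int (List (String × Int))) (days : List Int) (ml : Int)
    (hml : 0 ≤ ml) (codes : List (Int × String)) (acc : List (List String))
    (hacc : (acc.length : Int) ≤ ml) :
    pvLoopA d days ml codes acc =
      acc ++ (codes.take (ml.toNat - acc.length)).map (fun c => pvRowA d days c.1) := by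
  induction codes generalizing acc with
  | nil => simp [pvLoopA]
  | cons c rest ih =>
    rw [pvLoopA]
    by_cases h : (acc.length : Int) = ml
    · have : ml.toNat - acc.length = 0 := by omega
      simp [h, this]
    · have hlt : (acc.length : Int) < ml := lt_of_le_of_ne hacc h
      rw [if_neg h, ih (acc ++ [pvRowA d days c.1]) (by simp; omega)]
      have hb : ml.toNat - acc.length = (ml.toNat - (acc.length + 1)) + 1 := by omega
      simp [hb, List.take_succ_cons]

theorem buildOverviewList_eq_alt (data : List (Int × List (String × Int))) (codes : List (Int × String)) (max_length : Int) :
    buildOverviewList data codes max_length = buildOverviewList_alt data codes max_length := by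
  unfold buildOverviewList buildOverviewList_alt
  simp only []
  set d := PySem.Dict.ofList data with hd
  set days := PySem.List.sorted d.keys (fun x => x) false with hdays
  have hsel : pvLoopA d days max_length codes [] =
      (if max_length < 0 then codes else codes.take max_length.toNat).map (fun c => pvRowA d days c.1) := by
    by_cases hml : max_length < 0
    · rw [if_pos hml, pv_loopA_neg d days max_length hml codes []]; rfl
    · have h0 : 0 ≤ max_length := not_lt.mp hml
      rw [if_neg hml, pv_loopA_nonneg d days max_length h0 codes [] (by simpa using h0)]
      simp
  have hrows : (if max_length < 0 then codes else codes.take max_length.toNat).map (fun c => pvRowA d days c.1) =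
      (if max_length < 0 then codes else codes.take max_length.toNat).map
        (fun c => (days.map (fun day => pvDayMap (d.getD day []))).map (fun m => pvCellB m c.1)) := by
    apply List.map_congr_left
    intro c _
    exact pv_row_eq d days c.1
  rw [hsel, hrows]
  have hfill : d.keys.foldl (fun r _ => r ++ ["-"]) [] = List.replicate days.length "-" := by
    rw [pv_foldl_append_map (fun _ => "-") d.keys []]
    have hlen : days.length = d.keys.length := PySem.List.length_sorted _ _ _
    rw [hlen]
    simp [List.map_const']
  by_cases hempty : ((if max_length < 0 then codes else codes.take max_length.toNat).map
        (fun c => (days.map (fun day => pvDayMap (d.getD day []))).map (fun m => pvCellB m c.1))) = []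
  · rw [hempty]
    simp [hfill]
  · rw [if_neg hempty, if_neg (by simpa using hempty)]

-- ===== VERDICT (by name: the statement is the Claim_ definition above) =====
theorem buildOverviewList_spec : Claim_equal_buildOverviewList := by
  intro data codes max_length _
  unfold Spec_buildOverviewList
  exact buildOverviewList_eq_alt data codes max_length
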